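-- pv_equiv track=rewrite | github.com/GobinB/Route-inspection-problem_ai | finalsourceCode.py | aggregate_solutions
-- ===== SOURCE A (Python) =====
-- def aggregate_solutions(solutions):
--     # Sort the solutions based on their fitness. Lower fitness is better.
--     sorted_solutions = sorted(solutions, key=lambda x: x[1])
--
--     # Choosing the top N solutions for aggregation
--     top_n = 1
--     top_solutions = sorted_solutions[:top_n]
--
--     aggregated_solution = []
--     for i in range(len(top_solutions[0][0])):
--         edges = [solution[0][i] for solution in top_solutions]
--         most_common_edge = max(set(edges), key=edges.count)
--         aggregated_solution.append(most_common_edge)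
--
--     return aggregated_solution
-- ===== SOURCE B (Python) =====
-- def aggregate_solutions(solutions):
--     best = solutions[0]
--     for s in solutions[1:]:
--         if s[1] < best[1]:
--             best = s
--     return list(best[0])
-- ===== Notes on version B (the rewrite author's own statement) =====
-- stated objective: simpler
-- what changed: Replaced sort + slice + per-index set/count argmax reconstruction by a single linear scan keeping the first minimum-fitness solution and returning a copy of its edge list.
import Mathlib
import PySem

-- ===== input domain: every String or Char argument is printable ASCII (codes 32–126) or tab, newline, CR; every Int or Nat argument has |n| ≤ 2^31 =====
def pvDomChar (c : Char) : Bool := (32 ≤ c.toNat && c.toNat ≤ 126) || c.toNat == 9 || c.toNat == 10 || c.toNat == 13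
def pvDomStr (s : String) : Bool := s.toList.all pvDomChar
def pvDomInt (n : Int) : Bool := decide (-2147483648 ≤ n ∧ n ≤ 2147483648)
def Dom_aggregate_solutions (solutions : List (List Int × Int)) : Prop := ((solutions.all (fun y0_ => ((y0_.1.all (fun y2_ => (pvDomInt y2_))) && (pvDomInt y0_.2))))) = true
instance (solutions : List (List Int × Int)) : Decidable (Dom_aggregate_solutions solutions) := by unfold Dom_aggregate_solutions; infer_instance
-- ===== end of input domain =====

-- B replaces A's stable sort + top-1 slice + per-index set/count argmax by one linear
-- min-scan returning a copy of the first minimum-fitness solution's edge list (simpler).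

-- ===== PORT A =====
def aggregate_solutions (solutions : List (List Int × Int)) : List Int :=
  let sorted_solutions := PySem.List.sorted solutions (fun x => x.2)
  match PySem.List.slice sorted_solutions none (some 1) with
  | [] => []   -- Python raises IndexError at top_solutions[0] here (empty input, excluded by Pre_)
  | t0 :: ts =>
    let top_solutions := t0 :: ts
    (PySem.List.pyRange 0 (PySem.List.len t0.1)).foldl
      (fun aggregated_solution i =>
        let edges := top_solutions.map (fun solution => PySem.List.pyGetD solution.1 i 0)
        let most_common_edge :=
          (PySem.List.max? (PySem.Set.ofList edges) (fun x => (edges.count x : Int))).getD 0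
        aggregated_solution ++ [most_common_edge]) []

-- ===== PORT B =====
def aggregate_solutions_alt (solutions : List (List Int × Int)) : List Int :=
  match solutions with
  | [] => []   -- Python raises IndexError at solutions[0] here (excluded by Pre_)
  | best0 :: rest =>
    (rest.foldl (fun best s => if s.2 < best.2 then s else best) best0).1

-- ===== PRECONDITION & SPEC =====
-- Pre_ excludes exactly the empty list, on which Python A raises IndexError.
def Pre_aggregate_solutions (solutions : List (List Int × Int)) : Prop := solutions ≠ []
instance (solutions : List (List Int × Int)) : Decidable (Pre_aggregate_solutions solutions) := by unfold Pre_aggregate_solutions; infer_instance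
def pvWitness_aggregate_solutions : (List (List Int × Int)) := [([1, 2], 5), ([3], 2)]

def Spec_aggregate_solutions (solutions : List (List Int × Int)) (out : List Int) : Prop := out = aggregate_solutions_alt solutions
instance (solutions : List (List Int × Int)) (out : List Int) : Decidable (Spec_aggregate_solutions solutions out) := by unfold Spec_aggregate_solutions; infer_instance

-- ===== CLAIM (what is proved, stated in full; the proofs are below) =====
def Claim_equal_aggregate_solutions : Prop := ∀ (solutions : List (List Int × Int)), Dom_aggregate_solutions solutions → Pre_aggregate_solutions solutions → Spec_aggregate_solutions solutions (aggregate_solutions solutions)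

-- ===== LEMMAS AND PROOFS =====

-- Folding insertBy over a nonempty accumulator keeps the accumulator nonempty, and its head
-- is the strict-< min-scan of the inserted elements against the initial head.
theorem pv_insert_fold_head {α : Type} (before : α → α → Bool) :
    ∀ (rest : List α) (b : α) (t : List α), ∃ t',
      List.foldl (fun acc x => PySem.List.insertBy before x acc) (b :: t) rest
        = (rest.foldl (fun h x => if before x h then x else h) b) :: t' := by
  intro rest
  induction rest with
  | nil => intro b t; exact ⟨t, rfl⟩
  | cons x rs ih =>
    intro b t
    simp only [List.foldl_cons, PySem.List.insertBy]
    by_cases h : before x b = true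
    · simpa [h] using ih x (b :: t)
    · simpa [h] using ih b (PySem.List.insertBy before x t)

-- Head of the stable sort by fitness = B's strict-< scan (first minimum).
theorem pv_sorted_head (s : List Int × Int) (rest : List (List Int × Int)) : ∃ t',
    PySem.List.sorted (s :: rest) (fun x => x.2)
      = (rest.foldl (fun best x => if x.2 < best.2 then x else best) s) :: t' := by
  have h := pv_insert_fold_head (fun a b : List Int × Int => decide (a.2 < b.2)) rest s []
  obtain ⟨t', ht⟩ := h
  refine ⟨t', ?_⟩
  simp only [PySem.List.sorted, List.foldl_cons, PySem.List.insertBy] at *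
  convert ht using 2
  simp

-- ===== VERDICT (by name: the statement is the Claim_ definition above) =====
theorem aggregate_solutions_spec : Claim_equal_aggregate_solutions := by
  intro solutions _ hpre
  unfold Spec_aggregate_solutions
  match solutions with
  | [] => exact absurd rfl hpre
  | s :: rest =>
    obtain ⟨t', ht⟩ := pv_sorted_head s rest
    set m := rest.foldl (fun best x => if x.2 < best.2 then x else best) s with hm
    unfold aggregate_solutions aggregate_solutions_alt
    rw [ht]
    have hslice : PySem.List.slice (m :: t') none (some 1) = [m] := by
      simp [PySem.List.slice]
    simp only [hslice]
    have hfun : (fun aggregated_solution i =>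
        aggregated_solution ++
          [((PySem.List.max? (PySem.Set.ofList ([m].map (fun solution => PySem.List.pyGetD solution.1 i 0)))
              (fun x => (([m].map (fun solution => PySem.List.pyGetD solution.1 i 0)).count x : Int))).getD 0)])
        = (fun (aggregated_solution : List Int) (i : Int) =>
            aggregated_solution ++ [PySem.List.pyGetD m.1 i 0]) := by
      funext agg i
      simp [PySem.Set.ofList, PySem.List.max?]
    rw [hfun, PySem.List.foldl_append_singleton_eq_map, ← hm]
    simpa [PySem.List.len] using PySem.List.map_pyGetD_pyRange_zero m.1 (0 : Int)
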